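-- pv_equiv track=rewrite | github.com/vlad-marlo/algorithms | school/mr/hw/march/24/27.py | solution
-- ===== SOURCE A (Python) =====
-- def solution(data: list[int]) -> int:
--     mx = 0
--     n = len(data)
--     s = sum(data)
--     sm = 0
--     b = []
--     for i in data:
--         sm += i
--         b.append(sm)
--     for i in range(n):
--         sm += i * data[i]
--
--     mx = sm
--     for i in range(1, n):
--         sm = b[i-1] * 2 - s
--         mx = max(mx, sm)
--     return mx
-- ===== SOURCE B (Python) =====
-- def solution(data: list[int]) -> int:
--     n = len(data)
--     if n == 0:
--         return 0
--
--     def agg(lo: int, hi: int):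
--         # (sum, locally-indexed weighted sum, max prefix sum) of data[lo:hi]; hi > lo
--         if hi - lo == 1:
--             x = data[lo]
--             return (x, 0, x)
--         mid = (lo + hi) // 2
--         s1, w1, m1 = agg(lo, mid)
--         s2, w2, m2 = agg(mid, hi)
--         return (s1 + s2, w1 + w2 + (mid - lo) * s2, max(m1, s1 + m2))
--
--     s, w, _ = agg(0, n)
--     total = s + w
--     if n == 1:
--         return total
--     _, _, m = agg(0, n - 1)
--     return max(total, 2 * m - s)
-- ===== Notes on version B (the rewrite author's own statement) =====
-- stated objective: alternative
-- what changed: A makes three sequential linear passes (prefix-sum table, indexed weighted-sum loop, per-cut max scan over the table); B is a divide-and-conquer recursion that merges (sum, locally-indexed weighted sum, max prefix sum) triples over halves, keeps no prefix table and never enumerates cuts.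
import Mathlib
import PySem

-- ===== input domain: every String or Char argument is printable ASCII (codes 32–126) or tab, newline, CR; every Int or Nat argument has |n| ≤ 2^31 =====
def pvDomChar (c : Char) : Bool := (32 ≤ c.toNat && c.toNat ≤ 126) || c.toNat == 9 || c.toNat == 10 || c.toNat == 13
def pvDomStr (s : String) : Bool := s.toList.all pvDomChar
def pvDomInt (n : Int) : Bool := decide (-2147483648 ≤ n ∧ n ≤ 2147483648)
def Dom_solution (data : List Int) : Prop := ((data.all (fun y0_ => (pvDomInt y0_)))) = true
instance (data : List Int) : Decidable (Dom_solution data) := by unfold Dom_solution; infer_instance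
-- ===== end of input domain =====

-- B replaces A's three sequential linear passes (prefix-sum table, indexed weighted loop,
-- per-cut max scan) by a divide-and-conquer recursion merging (sum, weighted sum, max prefix
-- sum) triples over halves; alternative structure, same O(n) cost.

-- ===== PORT A =====
def solution (data : List Int) : Int :=
  let n : Int := data.length
  let s : Int := data.sum
  -- for i in data: sm += i; b.append(sm)
  let sb : Int × List Int := data.foldl (fun p i => (p.1 + i, p.2 ++ [p.1 + i])) (0, [])
  -- for i in range(n): sm += i * data[i]
  let sm : Int := (PySem.List.pyRange 0 n 1).foldl
      (fun acc i => acc + i * PySem.List.pyGetD data i 0) sb.1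
  -- mx = sm; for i in range(1, n): sm = b[i-1]*2 - s; mx = max(mx, sm)
  (PySem.List.pyRange 1 n 1).foldl
      (fun mx i => max mx (PySem.List.pyGetD sb.2 (i - 1) 0 * 2 - s)) sm

-- ===== PORT B =====
-- agg(lo, hi): D&C triple (sum, locally-indexed weighted sum, max prefix sum) of data[lo:hi].
-- Python's base test 'hi - lo == 1' is written 'hi ≤ lo + 1' (identical on every call site,
-- where lo < hi always holds); data[lo] is always in range at call sites (pyGetD default unused).
def pvAgg (data : List Int) (lo hi : Nat) : Int × Int × Int :=
  if hi ≤ lo + 1 then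
    let x := PySem.List.pyGetD data (lo : Int) 0
    (x, 0, x)
  else
    let mid := (lo + hi) / 2
    let L := pvAgg data lo mid
    let R := pvAgg data mid hi
    (L.1 + R.1, L.2.1 + R.2.1 + ((mid : Int) - (lo : Int)) * R.1, max L.2.2 (L.1 + R.2.2))
termination_by hi - lo
decreasing_by all_goals omega

def solution_alt (data : List Int) : Int :=
  let n := data.length
  if n = 0 then 0
  else
    let r := pvAgg data 0 n
    let total := r.1 + r.2.1
    if n = 1 then total
    else max total (2 * (pvAgg data 0 (n - 1)).2.2 - r.1)

-- ===== PRECONDITION & SPEC =====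
def Spec_solution (data : List Int) (out : Int) : Prop := out = solution_alt data
instance (data : List Int) (out : Int) : Decidable (Spec_solution data out) := by unfold Spec_solution; infer_instance

-- ===== CLAIM (what is proved, stated in full; the proofs are below) =====
def Claim_equal_solution : Prop := ∀ (data : List Int), Dom_solution data → Spec_solution data (solution data)

-- ===== LEMMAS AND PROOFS =====

-- running prefix sums, starting from accumulator a
def pvPfx (a : Int) : List Int → List Int
  | [] => []
  | x :: xs => (a + x) :: pvPfx (a + x) xs

-- Σ i·l[i] (0-based local indices)
def pvW : List Int → Int
  | [] => 0
  | _ :: xs => pvW xs + xs.sum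

-- max prefix sum of a NONEMPTY list (pvMp [] = 0 is a don't-care value)
def pvMp : List Int → Int
  | [] => 0
  | x :: xs => max x (x + pvMp xs)

-- A's first loop builds (a + sum, l ++ prefix sums)
theorem pvFoldPair (data : List Int) : ∀ (a : Int) (l : List Int),
    data.foldl (fun p i => (p.1 + i, p.2 ++ [p.1 + i])) (a, l)
      = (a + data.sum, l ++ pvPfx a data) := by
  induction data with
  | nil => intro a l; simp [pvPfx]
  | cons x xs ih => intro a l; simp [List.foldl_cons, ih, pvPfx, add_assoc]

theorem pvPfx_append (m : List Int) : ∀ (a : Int) (y : Int),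
    pvPfx a (m ++ [y]) = pvPfx a m ++ [a + m.sum + y] := by
  induction m with
  | nil => intro a y; simp [pvPfx]
  | cons x xs ih => intro a y; simp [pvPfx, ih, add_assoc]

theorem pvPfx_length (m : List Int) : ∀ a : Int, (pvPfx a m).length = m.length := by
  induction m with
  | nil => intro a; simp [pvPfx]
  | cons x xs ih => intro a; simp [pvPfx, ih]

-- A's weighted pass equals pvW
theorem pvEnumFold (data : List Int) : ∀ (k c : Int),
    (PySem.List.enumerate data k).foldl (fun acc p => acc + p.1 * p.2) c
      = c + k * data.sum + pvW data := by
  induction data with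
  | nil => intro k c; simp [PySem.List.enumerate_nil, pvW]
  | cons x xs ih =>
      intro k c
      simp only [PySem.List.enumerate_cons, List.foldl_cons]
      rw [ih]; simp only [pvW, List.sum_cons]; ring

-- max-fold commutation
theorem pvFoldlMaxMax (l : List Int) : ∀ a b : Int,
    l.foldl max (max a b) = max a (l.foldl max b) := by
  induction l with
  | nil => intro a b; rfl
  | cons x xs ih => intro a b; simp only [List.foldl_cons, max_assoc]; exact ih a (max b x)

-- a max-fold of an argument-wise fold body is a max-fold over the mapped list
theorem pvFoldlMaxMap {α : Type} (g : α → Int) (l : List α) : ∀ t : Int,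
    l.foldl (fun m x => max m (g x)) t = (l.map g).foldl max t := by
  induction l with
  | nil => intro t; rfl
  | cons x xs ih => intro t; simp only [List.foldl_cons, List.map_cons]; exact ih _

-- folding max over the affine image 2*p - s
theorem pvFoldlMaxAffine (s : Int) (tl : List Int) : ∀ (h t : Int),
    (List.map (fun p => p * 2 - s) (h :: tl)).foldl max t = max t ((tl.foldl max h) * 2 - s) := by
  induction tl with
  | nil => intro h t; simp
  | cons y tl ih =>
      intro h t
      simp only [List.map_cons, List.foldl_cons] at *
      rw [ih y (max t (h * 2 - s))]
      have h2 := pvFoldlMaxMax tl h y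
      omega

-- max over the prefix-sum list is pvMp (for nonempty l)
theorem pvMpPfx (l : List Int) (hl : l ≠ []) : ∀ (a t : Int),
    (pvPfx a l).foldl max t = max t (a + pvMp l) := by
  induction l with
  | nil => exact absurd rfl hl
  | cons x xs ih =>
      intro a t
      by_cases hxs : xs = []
      · subst hxs; simp [pvPfx, pvMp]
      · simp only [pvPfx, List.foldl_cons, pvMp]
        rw [ih hxs (a + x) (max t (a + x))]
        omega

theorem pvW_append (L R : List Int) : pvW (L ++ R) = pvW L + pvW R + L.length * R.sum := by
  induction L with
  | nil => simp [pvW]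
  | cons x xs ih => simp only [List.cons_append, pvW, ih, List.sum_append, List.length_cons]
                    push_cast; ring

theorem pvMp_append (L R : List Int) (h : L ≠ []) :
    pvMp (L ++ R) = max (pvMp L) (L.sum + pvMp R) := by
  induction L with
  | nil => exact absurd rfl h
  | cons x xs ih =>
      by_cases hxs : xs = []
      · subst hxs; simp [pvMp]
      · simp only [List.cons_append, pvMp, ih hxs, List.sum_cons]
        omega

-- range-fold over b[k] is the list itself (on the prefix before the last)
theorem pvGetDRange (c : List Int) (rest : List Int) :
    (List.range c.length).map (fun k => (c ++ rest).getD k 0) = c := by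
  apply List.ext_getElem
  · simp
  · intro k h1 h2
    simp at h1 ⊢
    rw [List.getElem?_append_left h1]
    simp [h1]

theorem pvMapGetD (c rest : List Int) (s : Int) :
    List.map (fun k => (c ++ rest).getD k 0 * 2 - s) (List.range c.length)
      = List.map (fun p => p * 2 - s) c := by
  conv_rhs => rw [← pvGetDRange c rest]
  rw [List.map_map]
  rfl

-- D&C correctness: pvAgg computes (sum, pvW, pvMp) of the slice data[lo:hi]
theorem pvAgg_eq (data : List Int) (d : Nat) : ∀ (lo hi : Nat), hi - lo ≤ d → lo < hi →
    hi ≤ data.length →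
    pvAgg data lo hi = (((data.drop lo).take (hi - lo)).sum,
                        pvW ((data.drop lo).take (hi - lo)),
                        pvMp ((data.drop lo).take (hi - lo))) := by
  induction d with
  | zero => intro lo hi hd hlt _; omega
  | succ d ih =>
      intro lo hi hd hlt hle
      by_cases hb : hi ≤ lo + 1
      · -- base: hi = lo + 1
        have hhi : hi = lo + 1 := by omega
        subst hhi
        have hlo : lo < data.length := by omega
        have hdn : data.drop lo ≠ [] := by
          simp [List.drop_eq_nil_iff]; omega
        obtain ⟨a, rest, hdr⟩ := List.exists_cons_of_ne_nil hdn
        have ha : a = data.getD lo 0 := by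
          have h0 : (data.drop lo)[0]'(by simp [hdr]) = data[lo + 0]'(by omega) :=
            List.getElem_drop ..
          simp [hdr] at h0
          simp [List.getD, ← h0, List.getElem?_eq_getElem hlo]
        rw [pvAgg]
        simp [hdr, ha, pvW, pvMp, PySem.List.pyGetD_natCast]
      · -- step
        have h2 : lo + 2 ≤ hi := by omega
        rw [pvAgg]
        simp only [if_neg hb]
        have hm1 : lo < (lo + hi) / 2 := by omega
        have hm2 : (lo + hi) / 2 < hi := by omega
        rw [ih lo ((lo + hi) / 2) (by omega) hm1 (by omega),
            ih ((lo + hi) / 2) hi (by omega) hm2 hle]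
        have hsplit : (data.drop lo).take (hi - lo)
            = (data.drop lo).take ((lo + hi) / 2 - lo)
              ++ (data.drop ((lo + hi) / 2)).take (hi - (lo + hi) / 2) := by
          have h1 : hi - lo = ((lo + hi) / 2 - lo) + (hi - (lo + hi) / 2) := by omega
          rw [h1, List.take_add, List.drop_drop]
          have hx : lo + ((lo + hi) / 2 - lo) = (lo + hi) / 2 := by omega
          rw [hx]
        have hlenL : ((data.drop lo).take ((lo + hi) / 2 - lo)).length = (lo + hi) / 2 - lo := by
          simp; omega
        have hLne : (data.drop lo).take ((lo + hi) / 2 - lo) ≠ [] := by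
          intro h; rw [h] at hlenL; simp at hlenL; omega
        rw [hsplit, List.sum_append, pvW_append, pvMp_append _ _ hLne, hlenL]
        simp only [Prod.mk.injEq]
        refine ⟨trivial, ?_, trivial⟩
        have hc : ((((lo + hi) / 2 - lo : Nat)) : Int) = ((lo + hi) / 2 : Nat) - (lo : Nat) := by
          omega
        rw [hc]

-- ===== VERDICT (by name: the statement is the Claim_ definition above) =====
theorem solution_spec : Claim_equal_solution := by
  intro data _
  unfold Spec_solution solution solution_alt
  simp only []
  rw [pvFoldPair data 0 []]
  -- A's weighted pass: rewrite the indexed range loop via enumerate, then pvW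
  have hen : PySem.List.enumerate data 0
      = (PySem.List.pyRange 0 (data.length : Int) 1).map (fun j => (j, PySem.List.pyGetD data j 0)) := by
    simpa using PySem.List.enumerate_eq_map_pyRange (xs := data) (d := 0)
  have htot :
      (PySem.List.pyRange 0 (data.length : Int) 1).foldl
          (fun acc i => acc + i * PySem.List.pyGetD data i 0) (0 + data.sum)
        = data.sum + pvW data := by
    have := pvEnumFold data 0 (0 + data.sum)
    rw [hen, List.foldl_map] at this
    simpa using this
  rw [htot]
  set t : Int := data.sum + pvW data with ht
  rcases data with _ | ⟨x, tl⟩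
  · simp only [List.length_nil]
    rw [ht]; simp [pvW]
  · by_cases hn : (x :: tl).length = 1
    · -- one element: A's third loop is empty, B returns total
      have htl : tl = [] := by simpa using hn
      subst htl
      have hr : PySem.List.pyRange 1 ((1 : Nat) : Int) 1 = [] :=
        PySem.List.pyRange_one_eq_nil (by omega)
      rw [pvAgg]
      simp only [pvW, List.sum_nil, add_zero] at ht
      simp [ht]
    · -- at least two elements: data = x :: (m ++ [y])
      have htl : tl ≠ [] := by intro h; simp [h] at hn
      obtain ⟨m, y, hmy⟩ : ∃ m y, tl = m ++ [y] :=
        ⟨tl.dropLast, tl.getLast htl, (List.dropLast_append_getLast htl).symm⟩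
      subst hmy
      have hlen : (x :: (m ++ [y])).length = m.length + 2 := by simp
      have hne0 : ¬ (x :: (m ++ [y])).length = 0 := by simp
      simp only [if_neg hne0, if_neg hn]
      -- B's two pvAgg calls
      have hfull := pvAgg_eq (x :: (m ++ [y])) (m.length + 2) 0 (m.length + 2)
        (by omega) (by omega) (by omega)
      have hpref := pvAgg_eq (x :: (m ++ [y])) (m.length + 2) 0 (m.length + 1)
        (by omega) (by omega) (by omega)
      simp only [Nat.sub_zero, List.drop_zero] at hfull hpref
      have hdfull : (x :: (m ++ [y])).take (m.length + 2) = x :: (m ++ [y]) := by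
        apply List.take_of_length_le; simp
      have hdpref : (x :: (m ++ [y])).take (m.length + 1) = x :: m := by
        simp [List.take_succ_cons]
      rw [hdfull] at hfull
      rw [hdpref] at hpref
      have h21 : m.length + 2 - 1 = m.length + 1 := by omega
      rw [hlen, hfull, h21, hpref]
      -- A's third loop over range(1, n)
      have hb : pvPfx 0 (x :: (m ++ [y])) = ((0 + x) :: pvPfx (0 + x) m) ++ [0 + x + m.sum + y] := by
        simp [pvPfx, pvPfx_append]
      have hrange : PySem.List.pyRange 1 (((m.length + 2 : Nat)) : Int) 1
          = (List.range ((0 + x) :: pvPfx (0 + x) m).length).map (fun k : Nat => (1 + (k : Int) : Int)) := by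
        rw [PySem.List.pyRange_one]
        have hl : ((((m.length + 2 : Nat) : Int)) - 1).toNat
            = ((0 + x) :: pvPfx (0 + x) m).length := by
          simp [pvPfx_length]; omega
        rw [hl]
      rw [hrange, List.foldl_map, hb]
      simp only [List.nil_append]
      have hidx : ∀ k : Nat,
          PySem.List.pyGetD ((((0:Int) + x) :: pvPfx (0 + x) m) ++ [0 + x + m.sum + y]) (1 + (k:Int) - 1) 0
            = ((((0:Int) + x) :: pvPfx (0 + x) m) ++ [0 + x + m.sum + y]).getD k 0 := by
        intro k
        have : (1 + (k:Int) - 1) = (k : Int) := by omega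
        rw [this, PySem.List.pyGetD_natCast]
      simp only [hidx]
      rw [pvFoldlMaxMap (fun k => ((((0:Int) + x) :: pvPfx (0 + x) m) ++ [0 + x + m.sum + y]).getD k 0 * 2
            - (x :: (m ++ [y])).sum) _ t]
      rw [pvMapGetD, pvFoldlMaxAffine]
      -- identify the prefix-table max with pvMp (x :: m)
      have hmp : (pvPfx (0 + x) m).foldl max (0 + x) = max (0 + x) (pvMp (x :: m)) := by
        have h1 := pvMpPfx (x :: m) (by simp) 0 (0 + x)
        simp only [pvPfx, List.foldl_cons, max_self, zero_add] at h1 ⊢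
        simpa using h1
      have hge : x ≤ pvMp (x :: m) := by simp [pvMp]
      rw [hmp]
      simp only [List.sum_cons, List.sum_append, List.sum_nil]
      simp only [List.sum_cons, List.sum_append, List.sum_nil] at ht
      omega
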